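-- pv_equiv track=rewrite | github.com/bnfhack/datasandbox | databnf/sparql.py | ns_prop
-- ===== SOURCE A (Python) =====
-- def ns_prop(uri, namespaces):
--     """convert the predicate ``uri`` in a readable qualified name
--
--     >>> ns_prop('http://www.w3.org/2004/02/skos/core#prefLabel',
--     ...         DatabnfDatabase.namespaces)
--     'skos:prefLabel'
--     """
--     reverse_ns = {v: k for k, v in namespaces.items()}
--     uri_lookup = sorted(reverse_ns.keys(),
--                         key=lambda k: len(k),
--                         reverse=True)
--     for ns_uri in uri_lookup:
--         if uri.startswith(ns_uri):
--             ns = reverse_ns[ns_uri]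
--             return u'{}:{}'.format(ns, uri[len(ns_uri):])
--     return uri
-- ===== SOURCE B (Python) =====
-- def ns_prop(uri, namespaces):
--     """One pass over the namespace items: keep the longest matching
--     namespace URI (last writer wins on ties, matching A's reverse-dict
--     collapse); no reverse dict and no sort."""
--     best_len = -1
--     best_name = None
--     for ns, ns_uri in namespaces.items():
--         if uri.startswith(ns_uri) and best_len <= len(ns_uri):
--             best_len = len(ns_uri)
--             best_name = ns
--     if best_name is None:
--         return uri
--     return u'{}:{}'.format(best_name, uri[best_len:])
-- ===== Notes on version B (the rewrite author's own statement) =====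
-- stated objective: simpler
-- what changed: Replaced A's reverse-dict construction plus length-descending sort plus first-match scan by a single pass over the namespace items that keeps the longest matching namespace URI (last writer wins on equal URIs, matching A's dict collapse).
import Mathlib
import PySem

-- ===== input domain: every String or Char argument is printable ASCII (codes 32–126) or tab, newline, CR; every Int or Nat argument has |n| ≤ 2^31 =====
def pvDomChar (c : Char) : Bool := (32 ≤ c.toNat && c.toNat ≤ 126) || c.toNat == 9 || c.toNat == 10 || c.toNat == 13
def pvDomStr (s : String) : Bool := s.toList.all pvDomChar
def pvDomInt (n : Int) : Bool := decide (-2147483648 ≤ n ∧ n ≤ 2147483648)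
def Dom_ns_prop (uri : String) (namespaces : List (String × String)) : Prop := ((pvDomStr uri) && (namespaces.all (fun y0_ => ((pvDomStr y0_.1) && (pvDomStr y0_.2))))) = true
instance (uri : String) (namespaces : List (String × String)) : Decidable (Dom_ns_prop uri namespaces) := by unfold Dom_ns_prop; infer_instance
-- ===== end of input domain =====

-- B replaces A's reverse-dict + length-sort + first-match scan by a single pass keeping the longest matching namespace URI (objective: simpler).

-- ===== PORT A =====
-- the 'for ns_uri in uri_lookup: if uri.startswith(ns_uri): return …' loop
def nsPropLoopA (uri : String) (reverse_ns : PySem.Dict String String) : List String → String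
  | [] => uri
  | ns_uri :: rest =>
    if PySem.Str.startswith uri ns_uri then
      reverse_ns.getD ns_uri "" ++ ":" ++ PySem.Str.slice uri (some (PySem.Str.len ns_uri)) none
    else nsPropLoopA uri reverse_ns rest

def ns_prop (uri : String) (namespaces : List (String × String)) : String :=
  let reverse_ns : PySem.Dict String String :=
    namespaces.foldl (fun acc kv => acc.insert kv.2 kv.1) PySem.Dict.empty
  let uri_lookup := PySem.List.sorted reverse_ns.keys (fun k => PySem.Str.len k) true
  nsPropLoopA uri reverse_ns uri_lookup

-- ===== PORT B =====
def ns_prop_alt (uri : String) (namespaces : List (String × String)) : String :=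
  let st := namespaces.foldl
    (fun st kv =>
      if PySem.Str.startswith uri kv.2 && decide (st.1 ≤ (PySem.Str.len kv.2)) then
        ((PySem.Str.len kv.2), some kv.1)
      else st)
    ((-1 : Int), (none : Option String))
  match st.2 with
  | none => uri
  | some name => name ++ ":" ++ PySem.Str.slice uri (some st.1) none

-- ===== PRECONDITION & SPEC =====
def Spec_ns_prop (uri : String) (namespaces : List (String × String)) (out : String) : Prop := out = ns_prop_alt uri namespaces
instance (uri : String) (namespaces : List (String × String)) (out : String) : Decidable (Spec_ns_prop uri namespaces out) := by unfold Spec_ns_prop; infer_instance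

-- ===== CLAIM (what is proved, stated in full; the proofs are below) =====
def Claim_equal_ns_prop : Prop := ∀ (uri : String) (namespaces : List (String × String)), Dom_ns_prop uri namespaces → Spec_ns_prop uri namespaces (ns_prop uri namespaces)

-- ===== LEMMAS AND PROOFS =====

-- two prefixes of uri with the same length are the same string
theorem pvStartswith_uniq (uri v w : String)
    (hv : PySem.Str.startswith uri v = true) (hw : PySem.Str.startswith uri w = true)
    (hl : PySem.Str.len v = PySem.Str.len w) : v = w := by
  rw [PySem.Str.startswith_eq, PySem.Chars.startswith_iff] at hv hw
  rw [PySem.Str.len_eq, PySem.Str.len_eq] at hl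
  have hlen : v.toList.length = w.toList.length := by exact_mod_cast hl
  have h1 : v.toList <+: w.toList :=
    List.prefix_of_prefix_length_le hv hw (le_of_eq hlen)
  exact String.toList_inj.mp (h1.eq_of_length hlen)

theorem pvNegOne_le_len (s : String) : (-1 : Int) ≤ PySem.Str.len s := by
  rw [PySem.Str.len_eq]; omega

-- lookup in the reverse dict built by A's comprehension: the LAST pair with that value wins
theorem pvGetD_revfold (l : List (String × String)) (d : PySem.Dict String String)
    (v dflt : String) :
    (l.foldl (fun acc kv => acc.insert kv.2 kv.1) d).getD v dflt =
      (match l.reverse.find? (fun kv => kv.2 == v) with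
       | some kv => kv.1
       | none => d.getD v dflt) := by
  induction l using List.reverseRecOn with
  | nil => simp
  | append_singleton l kv ih =>
    rw [List.foldl_append]
    simp only [List.foldl_cons, List.foldl_nil, List.reverse_append, List.reverse_singleton,
      List.singleton_append, List.find?_cons]
    by_cases h : kv.2 = v
    · subst h
      simp [PySem.Dict.getD_insert_self]
    · have hb : (kv.2 == v) = false := by simp [h]
      rw [hb]
      rw [PySem.Dict.getD_insert_of_ne _ _ _ (fun hh => h hh.symm)]
      exact ih

-- A's scan returns uri when nothing matches
theorem pvLoopA_none (uri : String) (d : PySem.Dict String String) (ks : List String)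
    (h : ∀ v ∈ ks, PySem.Str.startswith uri v = false) : nsPropLoopA uri d ks = uri := by
  induction ks with
  | nil => rfl
  | cons k ks ih =>
    simp only [nsPropLoopA, h k List.mem_cons_self, Bool.false_eq_true, if_false]
    exact ih (fun v hv => h v (List.mem_cons_of_mem _ hv))

-- A's scan over a length-descending list returns the longest match
theorem pvLoopA_some (uri : String) (d : PySem.Dict String String) :
    ∀ ks : List String, ks.Pairwise (fun a b => PySem.Str.len b ≤ PySem.Str.len a) →
    ∀ v0 ∈ ks, PySem.Str.startswith uri v0 = true →
    ∃ v ∈ ks, PySem.Str.startswith uri v = true ∧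
      (∀ w ∈ ks, PySem.Str.startswith uri w = true → PySem.Str.len w ≤ PySem.Str.len v) ∧
      nsPropLoopA uri d ks =
        d.getD v "" ++ ":" ++ PySem.Str.slice uri (some (PySem.Str.len v)) none := by
  intro ks
  induction ks with
  | nil => intro _ v0 h; exact absurd h (List.not_mem_nil)
  | cons k ks ih =>
    intro hp v0 hv0 hm
    by_cases hk : PySem.Str.startswith uri k = true
    · refine ⟨k, List.mem_cons_self, hk, ?_, ?_⟩
      · intro w hw _
        rcases List.mem_cons.mp hw with rfl | hw
        · exact le_refl _
        · exact (List.pairwise_cons.mp hp).1 w hw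
      · simp only [nsPropLoopA, hk, if_true]
    · have hv0' : v0 ∈ ks := by
        rcases List.mem_cons.mp hv0 with rfl | h
        · exact absurd hm hk
        · exact h
      obtain ⟨v, hvmem, hvm, hmax, heq⟩ := ih (List.pairwise_cons.mp hp).2 v0 hv0' hm
      refine ⟨v, List.mem_cons_of_mem _ hvmem, hvm, ?_, ?_⟩
      · intro w hw hmw
        rcases List.mem_cons.mp hw with rfl | hw
        · exact absurd hmw hk
        · exact hmax w hw hmw
      · simp only [nsPropLoopA, hk, Bool.false_eq_true, if_false]
        exact heq

-- B's single pass: either nothing matched, or the state holds the longest match's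
-- length together with the key of the LAST pair carrying that namespace URI
theorem pvFoldB_char (uri : String) (l : List (String × String)) :
    ((∀ kv ∈ l, PySem.Str.startswith uri kv.2 = false) ∧
      l.foldl
        (fun st kv =>
          if PySem.Str.startswith uri kv.2 && decide (st.1 ≤ (PySem.Str.len kv.2)) then
            ((PySem.Str.len kv.2), some kv.1)
          else st)
        ((-1 : Int), (none : Option String)) = (-1, none))
    ∨ (∃ v kv0, PySem.Str.startswith uri v = true ∧
        l.reverse.find? (fun kv => kv.2 == v) = some kv0 ∧
        (∀ kv ∈ l, PySem.Str.startswith uri kv.2 = true →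
          PySem.Str.len kv.2 ≤ PySem.Str.len v) ∧
        l.foldl
          (fun st kv =>
            if PySem.Str.startswith uri kv.2 && decide (st.1 ≤ (PySem.Str.len kv.2)) then
              ((PySem.Str.len kv.2), some kv.1)
            else st)
          ((-1 : Int), (none : Option String)) = (PySem.Str.len v, some kv0.1)) := by
  induction l using List.reverseRecOn with
  | nil => left; exact ⟨fun kv h => absurd h (List.not_mem_nil), rfl⟩
  | append_singleton l kv ih =>
    rw [List.foldl_append] at *
    simp only [List.foldl_cons, List.foldl_nil, List.reverse_append, List.reverse_singleton,
      List.singleton_append, List.find?_cons] at *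
    by_cases hm : PySem.Str.startswith uri kv.2 = true
    · rcases ih with ⟨hall, heq⟩ | ⟨v, kv0, hvm, hfind, hmax, heq⟩
      · -- first match
        right
        refine ⟨kv.2, kv, hm, by simp, ?_, ?_⟩
        · intro p hp hmp
          rcases List.mem_append.mp hp with hp | hp
          · rw [hall p hp] at hmp; cases hmp
          · rcases List.mem_singleton.mp hp with rfl; exact le_refl _
        · rw [heq]
          simp only [hm, Bool.true_and]
          rw [if_pos (by exact decide_eq_true (pvNegOne_le_len kv.2))]
      · by_cases hle : PySem.Str.len v ≤ PySem.Str.len kv.2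
        · -- new (weakly) longer match: kv takes over
          right
          refine ⟨kv.2, kv, hm, by simp, ?_, ?_⟩
          · intro p hp hmp
            rcases List.mem_append.mp hp with hp | hp
            · exact le_trans (hmax p hp hmp) hle
            · rcases List.mem_singleton.mp hp with rfl; exact le_refl _
          · rw [heq]
            simp only [hm, Bool.true_and]
            rw [if_pos (by exact decide_eq_true hle)]
        · -- shorter match: state unchanged
          right
          have hne : (kv.2 == v) = false := by
            apply beq_eq_false_iff_ne.mpr
            intro hvv
            exact hle (le_of_eq (by rw [hvv]))
          refine ⟨v, kv0, hvm, ?_, ?_, ?_⟩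
          · rw [hne]; exact hfind
          · intro p hp hmp
            rcases List.mem_append.mp hp with hp | hp
            · exact hmax p hp hmp
            · rcases List.mem_singleton.mp hp with rfl
              exact (not_le.mp hle).le
          · rw [heq]
            simp only [hm, Bool.true_and]
            rw [if_neg (by simpa using hle)]
    · -- kv does not match: everything is unchanged
      have hm' : PySem.Str.startswith uri kv.2 = false := Bool.eq_false_iff.mpr hm
      rcases ih with ⟨hall, heq⟩ | ⟨v, kv0, hvm, hfind, hmax, heq⟩
      · left
        refine ⟨?_, ?_⟩
        · intro p hp
          rcases List.mem_append.mp hp with hp | hp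
          · exact hall p hp
          · rcases List.mem_singleton.mp hp with rfl; exact hm'
        · rw [heq]
          simp only [hm', Bool.false_and, Bool.false_eq_true, if_false]
      · right
        have hne : (kv.2 == v) = false := by
          apply beq_eq_false_iff_ne.mpr
          intro hvv
          have hx : PySem.Str.startswith uri v = false := hvv ▸ hm'
          rw [hvm] at hx; cases hx
        refine ⟨v, kv0, hvm, ?_, ?_, ?_⟩
        · rw [hne]; exact hfind
        · intro p hp hmp
          rcases List.mem_append.mp hp with hp | hp
          · exact hmax p hp hmp
          · rcases List.mem_singleton.mp hp with rfl
            exact absurd hmp hm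
        · rw [heq]
          simp only [hm', Bool.false_and, Bool.false_eq_true, if_false]

-- definitional shapes of the two ports
theorem pvA_eq (uri : String) (namespaces : List (String × String)) :
    ns_prop uri namespaces =
      nsPropLoopA uri (namespaces.foldl (fun acc kv => acc.insert kv.2 kv.1) PySem.Dict.empty)
        (PySem.List.sorted
          (namespaces.foldl (fun acc kv => acc.insert kv.2 kv.1) PySem.Dict.empty).keys
          (fun k => PySem.Str.len k) true) := rfl

theorem pvB_eq (uri : String) (namespaces : List (String × String)) :
    ns_prop_alt uri namespaces =
      (match (namespaces.foldl
        (fun st kv =>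
          if PySem.Str.startswith uri kv.2 && decide (st.1 ≤ (PySem.Str.len kv.2)) then
            ((PySem.Str.len kv.2), some kv.1)
          else st)
        ((-1 : Int), (none : Option String))).2 with
      | none => uri
      | some name => name ++ ":" ++ PySem.Str.slice uri
          (some (namespaces.foldl
            (fun st kv =>
              if PySem.Str.startswith uri kv.2 && decide (st.1 ≤ (PySem.Str.len kv.2)) then
                ((PySem.Str.len kv.2), some kv.1)
              else st)
            ((-1 : Int), (none : Option String))).1) none) := rfl

-- ===== VERDICT (by name: the statement is the Claim_ definition above) =====
theorem ns_prop_spec : Claim_equal_ns_prop := by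
  unfold Claim_equal_ns_prop
  intro uri namespaces _
  unfold Spec_ns_prop
  rw [pvA_eq, pvB_eq]
  have hkeys :
      (namespaces.foldl (fun acc kv => acc.insert kv.2 kv.1) PySem.Dict.empty).keys
        = PySem.Set.ofList (namespaces.map (fun kv => kv.2)) := by
    rw [PySem.Dict.keys_foldl_insert_key namespaces (fun kv => kv.2) (fun _ kv => kv.1)
      PySem.Dict.empty, PySem.Dict.keys_empty, PySem.Set.update_nil_left]
  have hmemk : ∀ w, w ∈ (PySem.List.sorted
      (namespaces.foldl (fun acc kv => acc.insert kv.2 kv.1) PySem.Dict.empty).keys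
      (fun k => PySem.Str.len k) true) ↔ ∃ kv ∈ namespaces, kv.2 = w := by
    intro w
    rw [PySem.List.mem_sorted, hkeys, PySem.Set.mem_ofList, List.mem_map]
  rcases pvFoldB_char uri namespaces with ⟨hall, heq⟩ | ⟨v, kv0, hvm, hfind, hmax, heq⟩
  · rw [heq]
    exact pvLoopA_none uri _ _ (fun w hw => by
      obtain ⟨kv, hkv, rfl⟩ := (hmemk w).mp hw
      exact hall kv hkv)
  · rw [heq]
    have hvmem : v ∈ (PySem.List.sorted
        (namespaces.foldl (fun acc kv => acc.insert kv.2 kv.1) PySem.Dict.empty).keys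
        (fun k => PySem.Str.len k) true) := by
      rw [hmemk]
      have hkv0 : kv0 ∈ namespaces.reverse := List.mem_of_find?_eq_some hfind
      have hkv0v : kv0.2 = v := by
        have := List.find?_some hfind
        exact beq_iff_eq.mp this
      exact ⟨kv0, List.mem_reverse.mp hkv0, hkv0v⟩
    obtain ⟨vA, hvAmem, hvAm, hmaxA, heqA⟩ :=
      pvLoopA_some uri _ _
        (PySem.List.sorted_pairwise_rev _ (fun k => PySem.Str.len k)) v hvmem hvm
    have hvAv : vA = v := by
      apply pvStartswith_uniq uri vA v hvAm hvm
      apply le_antisymm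
      · obtain ⟨kvA, hkvA, rfl⟩ := (hmemk vA).mp hvAmem
        exact hmax kvA hkvA hvAm
      · exact hmaxA v hvmem hvm
    rw [heqA, hvAv]
    rw [pvGetD_revfold, hfind]
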